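-- pv_equiv track=rewrite | github.com/tum-lkn/mistill | ebpf/send_packets.py | create_hosts_tors_pods
-- ===== SOURCE A (Python) =====
-- def create_hosts_tors_pods(k: int, max_num_pods: int):
--     dests=[]
--     tors=[]
--     pods=[]
--     iter1=[]
--     iter2=[]
--     it = min(k, max_num_pods)
--     for a in range(it):
--         for b in range(int(k/2)):
--             for c in range(2,int(k/2+2)):
--                 ip = "10." + str(a) + "." + str(b) + "." + str(c)
--                 dests.append(ip)
--                 iter1.append(ip)
--                 iter2.append(ip)
--             tors.append(' '.join(iter1))
--             iter1.clear()
--         pods.append(' '.join(iter2))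
--         iter2.clear()
--     return dests, tors, pods
-- ===== SOURCE B (Python) =====
-- def create_hosts_tors_pods(k: int, max_num_pods: int):
--     # Build the addresses once as a nested grid, then derive the three outputs
--     # in three separate, differently-shaped passes.
--     grid = [[["10." + str(a) + "." + str(b) + "." + str(c)
--               for c in range(2, int(k / 2 + 2))]
--              for b in range(int(k / 2))]
--             for a in range(min(k, max_num_pods))]
--     dests = [ip for pod in grid for tor in pod for ip in tor]
--     tors = [' '.join(tor) for pod in grid for tor in pod]
--     pods = [' '.join(ip for tor in pod for ip in tor) for pod in grid]
--     return dests, tors, pods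
-- ===== Notes on version B (the rewrite author's own statement) =====
-- stated objective: alternative
-- what changed: Replaces the single interleaved triple loop with mutable clear()-ed buffers by building the nested address grid once with comprehensions and deriving dests/tors/pods in three separate flattening passes.
import Mathlib
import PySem

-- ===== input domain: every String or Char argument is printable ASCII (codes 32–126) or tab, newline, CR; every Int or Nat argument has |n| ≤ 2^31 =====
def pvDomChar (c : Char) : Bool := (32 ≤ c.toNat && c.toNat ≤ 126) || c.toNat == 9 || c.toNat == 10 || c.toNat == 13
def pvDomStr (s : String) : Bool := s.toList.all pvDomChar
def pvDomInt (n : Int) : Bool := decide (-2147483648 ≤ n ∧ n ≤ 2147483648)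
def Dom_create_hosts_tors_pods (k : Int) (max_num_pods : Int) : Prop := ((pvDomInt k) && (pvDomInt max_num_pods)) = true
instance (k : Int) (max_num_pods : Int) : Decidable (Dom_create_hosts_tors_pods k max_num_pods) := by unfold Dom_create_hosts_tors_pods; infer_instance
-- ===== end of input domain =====

-- B builds the address grid once with comprehensions and derives dests/tors/pods in
-- three separate flattening passes instead of A's interleaved triple loop with buffers.

-- shared by both ports: the literal "10." + str(a) + "." + str(b) + "." + str(c)
def pvIp (a b c : Int) : String :=
  "10." ++ PySem.Int.toStr a ++ "." ++ PySem.Int.toStr b ++ "." ++ PySem.Int.toStr c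

-- int(k/2): k/2 is an exact float for |k| ≤ 2^31, int truncates toward zero = Int.tdiv
def pvHalf (k : Int) : Int := Int.tdiv k 2
-- int(k/2+2) = trunc((k+4)/2) = Int.tdiv (k+4) 2, exact for |k| ≤ 2^31
def pvHalfP2 (k : Int) : Int := Int.tdiv (k + 4) 2

-- ===== PORT A =====
-- state of the innermost loop: ((dests, tors, pods), iter1, iter2)
def pvStepC (a b : Int)
    (st : (List String × List String × List String) × List String × List String)
    (c : Int) : (List String × List String × List String) × List String × List String :=
  let ip := pvIp a b c
  ((st.1.1 ++ [ip], st.1.2.1, st.1.2.2), st.2.1 ++ [ip], st.2.2 ++ [ip])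

-- body of the b-loop: run the c-loop with iter1 = [], then append the join to tors
def pvStepB (k a : Int)
    (st : (List String × List String × List String) × List String) (b : Int) :
    (List String × List String × List String) × List String :=
  let r := (PySem.List.pyRange 2 (pvHalfP2 k) 1).foldl (pvStepC a b) (st.1, ([], st.2))
  ((r.1.1, r.1.2.1 ++ [PySem.Str.join " " r.2.1], r.1.2.2), r.2.2)

-- body of the a-loop: run the b-loop with iter2 = [], then append the join to pods
def pvStepA (k : Int) (st : List String × List String × List String) (a : Int) :
    List String × List String × List String :=
  let r := (PySem.List.pyRange 0 (pvHalf k) 1).foldl (pvStepB k a) (st, [])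
  (r.1.1, r.1.2.1, r.1.2.2 ++ [PySem.Str.join " " r.2])

def create_hosts_tors_pods (k : Int) (max_num_pods : Int) :
    List String × List String × List String :=
  let it := min k max_num_pods
  (PySem.List.pyRange 0 it 1).foldl (pvStepA k) ([], [], [])

-- ===== PORT B =====
def create_hosts_tors_pods_alt (k : Int) (max_num_pods : Int) :
    List String × List String × List String :=
  let grid :=
    (PySem.List.pyRange 0 (min k max_num_pods) 1).map (fun a =>
      (PySem.List.pyRange 0 (pvHalf k) 1).map (fun b =>
        (PySem.List.pyRange 2 (pvHalfP2 k) 1).map (fun c => pvIp a b c)))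
  let dests := grid.flatMap (fun pod => pod.flatMap id)
  let tors := grid.flatMap (fun pod => pod.map (PySem.Str.join " "))
  let pods := grid.map (fun pod => PySem.Str.join " " (pod.flatMap id))
  (dests, tors, pods)

-- ===== PRECONDITION & SPEC =====
def Spec_create_hosts_tors_pods (k : Int) (max_num_pods : Int) (out : List String × List String × List String) : Prop := out = create_hosts_tors_pods_alt k max_num_pods
instance (k : Int) (max_num_pods : Int) (out : List String × List String × List String) : Decidable (Spec_create_hosts_tors_pods k max_num_pods out) := by unfold Spec_create_hosts_tors_pods; infer_instance

-- ===== CLAIM (what is proved, stated in full; the proofs are below) =====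
def Claim_equal_create_hosts_tors_pods : Prop := ∀ (k : Int) (max_num_pods : Int), Dom_create_hosts_tors_pods k max_num_pods → Spec_create_hosts_tors_pods k max_num_pods (create_hosts_tors_pods k max_num_pods)

-- ===== LEMMAS AND PROOFS =====

-- the c-row of addresses for fixed a, b
def pvRow (k a b : Int) : List String :=
  (PySem.List.pyRange 2 (pvHalfP2 k) 1).map (fun c => pvIp a b c)

lemma pvInnerFold (a b : Int) (L : List Int)
    (d t p i1 i2 : List String) :
    L.foldl (pvStepC a b) ((d, t, p), i1, i2) =
      ((d ++ L.map (pvIp a b), t, p), i1 ++ L.map (pvIp a b), i2 ++ L.map (pvIp a b)) := by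
  induction L generalizing d i1 i2 with
  | nil => simp
  | cons c L ih =>
      simp only [List.foldl_cons, pvStepC, List.map_cons]
      rw [ih]
      simp [List.append_assoc]

lemma pvMidFold (k a : Int) (L : List Int) (d t p i2 : List String) :
    L.foldl (pvStepB k a) ((d, t, p), i2) =
      ((d ++ L.flatMap (pvRow k a),
        t ++ L.map (fun b => PySem.Str.join " " (pvRow k a b)), p),
       i2 ++ L.flatMap (pvRow k a)) := by
  induction L generalizing d t i2 with
  | nil => simp
  | cons b L ih =>
      simp only [List.foldl_cons, pvStepB, pvInnerFold, List.nil_append]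
      rw [ih]
      simp [pvRow, List.append_assoc]

lemma pvOuterFold (k : Int) (L : List Int) (d t p : List String) :
    L.foldl (pvStepA k) (d, t, p) =
      (d ++ L.flatMap (fun a => (PySem.List.pyRange 0 (pvHalf k) 1).flatMap (pvRow k a)),
       t ++ L.flatMap (fun a =>
          (PySem.List.pyRange 0 (pvHalf k) 1).map (fun b => PySem.Str.join " " (pvRow k a b))),
       p ++ L.map (fun a =>
          PySem.Str.join " " ((PySem.List.pyRange 0 (pvHalf k) 1).flatMap (pvRow k a)))) := by
  induction L generalizing d t p with
  | nil => simp
  | cons a L ih =>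
      simp only [List.foldl_cons, pvStepA, pvMidFold, List.nil_append]
      rw [ih]
      simp [List.append_assoc]

-- ===== VERDICT (by name: the statement is the Claim_ definition above) =====
theorem create_hosts_tors_pods_spec : Claim_equal_create_hosts_tors_pods := by
  intro k m _
  unfold Spec_create_hosts_tors_pods create_hosts_tors_pods create_hosts_tors_pods_alt
  rw [pvOuterFold]
  have h : ∀ a : Int,
      (List.map (fun b => List.map (fun c => pvIp a b c) (PySem.List.pyRange 2 (pvHalfP2 k)))
        (PySem.List.pyRange 0 (pvHalf k))).flatten =
      List.flatMap (pvRow k a) (PySem.List.pyRange 0 (pvHalf k)) := by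
    intro a
    have hrow : pvRow k a = fun b =>
        List.map (fun c => pvIp a b c) (PySem.List.pyRange 2 (pvHalfP2 k)) := by
      funext b; simp [pvRow]
    simp [List.flatMap, hrow]
  simp [pvRow, List.flatMap_map, List.map_map, Function.comp_def, h]
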